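-- pv_equiv track=rewrite | github.com/zanonalucas/cmpc-guaiba | src/metrisapi/helpers.py | process_raw_trend_values
-- ===== SOURCE A (Python) =====
-- def process_raw_trend_values(trend_values):
--     """
--     Hotfix when pulling raw data via Metris API: the final value is provided a random number of times
--     if resolution == 0 and interpolation_resolution_type == InterpolationResolutionType.ticks
--     """
--     trend_value_last = trend_values[-1]
--     while True:
--         if len(trend_values) < 2:
--             return trend_values
--         if not trend_value_last['x'] == trend_values[-1]['x'] == trend_values[-2]['x']:
--             return trend_values
--         trend_values.pop(-1)
-- ===== SOURCE B (Python) =====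
-- def process_raw_trend_values(trend_values):
--     if len(trend_values) < 2:
--         return trend_values
--     x_last = trend_values[-1]['x']
--     i = len(trend_values) - 1
--     while i > 0 and trend_values[i - 1]['x'] == x_last:
--         i -= 1
--     del trend_values[i + 1:]
--     return trend_values
-- ===== Notes on version B (the rewrite author's own statement) =====
-- stated objective: simpler
-- what changed: A's while-True loop that re-tests the last two elements and pops one element per iteration is replaced by a leftward index scan that finds the start of the trailing run of equal 'x' values followed by a single bulk slice deletion.
import Mathlib
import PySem

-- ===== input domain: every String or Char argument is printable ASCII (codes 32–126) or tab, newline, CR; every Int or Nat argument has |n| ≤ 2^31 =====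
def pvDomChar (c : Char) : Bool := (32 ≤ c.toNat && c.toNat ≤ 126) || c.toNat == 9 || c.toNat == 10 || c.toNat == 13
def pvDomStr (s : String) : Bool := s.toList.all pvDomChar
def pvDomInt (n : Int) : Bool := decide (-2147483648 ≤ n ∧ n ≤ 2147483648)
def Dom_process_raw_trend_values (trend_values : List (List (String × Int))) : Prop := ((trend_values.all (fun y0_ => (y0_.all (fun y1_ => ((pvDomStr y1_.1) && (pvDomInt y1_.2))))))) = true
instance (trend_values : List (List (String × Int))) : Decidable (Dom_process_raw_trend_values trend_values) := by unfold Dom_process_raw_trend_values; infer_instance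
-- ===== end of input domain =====

-- B replaces A's interleaved test-and-pop loop by an index scan that finds the start of the
-- trailing run followed by ONE bulk truncation (objective: simpler decomposition; in Python both
-- mutate the argument list in place and return the same object; the proof is about the value).

-- m['x'] : first-match lookup of key "x" (Python dict access; none = KeyError, excluded by Pre_)
def pvGetX (m : List (String × Int)) : Option Int := (PySem.Dict.mk m).get? "x"

-- ===== PORT A =====
-- A's while-True loop: each iteration either returns or pops the last element.
-- `lastX` is trend_value_last['x'] as an Option (the dict trend_value_last never changes, so the
-- lookup is the same value every iteration); a `none` (KeyError in Python) is outside Pre_ and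
-- the port then takes the return branch (Option equality with none fails against some _).
def pvALoop (lastX : Option Int) (tv : List (List (String × Int))) : List (List (String × Int)) :=
  if tv.length < 2 then tv
  else
    if ¬(lastX = (PySem.List.pyGet? tv (-1)).bind pvGetX ∧
         (PySem.List.pyGet? tv (-1)).bind pvGetX = (PySem.List.pyGet? tv (-2)).bind pvGetX) then tv
    else pvALoop lastX tv.dropLast   -- trend_values.pop(-1)
termination_by tv.length
decreasing_by simp only [List.length_dropLast]; omega

def process_raw_trend_values (trend_values : List (List (String × Int))) : List (List (String × Int)) :=
  -- trend_value_last = trend_values[-1]; its ['x'] lookup, as an Option (none = IndexError/KeyError, excluded by Pre_)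
  pvALoop ((PySem.List.pyGet? trend_values (-1)).bind pvGetX) trend_values

-- ===== PORT B =====
-- B's while loop: scan i leftward while trend_values[i-1]['x'] == x_last.
def pvBScan (tv : List (List (String × Int))) (X : Option Int) (i : Nat) : Nat :=
  if 0 < i ∧ (tv[i - 1]?.bind pvGetX) = X then pvBScan tv X (i - 1) else i
termination_by i
decreasing_by omega

def process_raw_trend_values_alt (trend_values : List (List (String × Int))) : List (List (String × Int)) :=
  if trend_values.length < 2 then trend_values
  else
    let X := trend_values.getLast?.bind pvGetX   -- x_last = trend_values[-1]['x']
    let i := pvBScan trend_values X (trend_values.length - 1)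
    trend_values.take (i + 1)                    -- del trend_values[i+1:]

-- ===== PRECONDITION & SPEC =====
-- Pre_ is exactly the set of inputs on which the Python A returns normally: the list is nonempty
-- (else IndexError) and, when it has ≥ 2 elements, the last element has key "x" and every element
-- whose whole right-suffix carries that same "x"-value (i.e. every element A's pop loop reaches)
-- also has key "x" (else KeyError).
def Pre_process_raw_trend_values (trend_values : List (List (String × Int))) : Prop :=
  trend_values ≠ [] ∧
  (2 ≤ trend_values.length →
    (trend_values.getLast?.bind pvGetX).isSome ∧
    ∀ j, j < trend_values.length - 1 →
      (∀ k, k < trend_values.length → j < k →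
        (trend_values[k]?.bind pvGetX) = trend_values.getLast?.bind pvGetX) →
      (trend_values[j]?.bind pvGetX).isSome)

instance (trend_values : List (List (String × Int))) : Decidable (Pre_process_raw_trend_values trend_values) := by
  unfold Pre_process_raw_trend_values; infer_instance

def pvWitness_process_raw_trend_values : (List (List (String × Int))) := [[("x", 1)], [("x", 1)]]

def Spec_process_raw_trend_values (trend_values : List (List (String × Int))) (out : List (List (String × Int))) : Prop := out = process_raw_trend_values_alt trend_values
instance (trend_values : List (List (String × Int))) (out : List (List (String × Int))) : Decidable (Spec_process_raw_trend_values trend_values out) := by unfold Spec_process_raw_trend_values; infer_instance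

-- ===== CLAIM (what is proved, stated in full; the proofs are below) =====
def Claim_equal_process_raw_trend_values : Prop := ∀ (trend_values : List (List (String × Int))), Dom_process_raw_trend_values trend_values → Pre_process_raw_trend_values trend_values → Spec_process_raw_trend_values trend_values (process_raw_trend_values trend_values)

-- ===== LEMMAS AND PROOFS =====

theorem pvBScan_le (tv : List (List (String × Int))) (X : Option Int) (i : Nat) :
    pvBScan tv X i ≤ i := by
  induction i using Nat.strong_induction_on with
  | _ i ih =>
    rw [pvBScan]
    split
    · rename_i h
      exact le_trans (ih (i - 1) (by omega)) (by omega)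
    · exact le_rfl

theorem pvBScan_congr (tv₁ tv₂ : List (List (String × Int))) (X : Option Int) (i : Nat)
    (h : ∀ k, k < i → tv₁[k]? = tv₂[k]?) : pvBScan tv₁ X i = pvBScan tv₂ X i := by
  induction i using Nat.strong_induction_on with
  | _ i ih =>
    rw [pvBScan]
    conv_rhs => rw [pvBScan]
    by_cases hi : 0 < i
    · rw [h (i - 1) (by omega)]
      split
      · exact ih (i - 1) (by omega) (fun k hk => h k (by omega))
      · rfl
    · have hz : i = 0 := by omega
      subst hz
      simp

theorem pvALoop_eq_take (n : Nat) : ∀ (tv : List (List (String × Int))) (X : Option Int),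
    tv.length = n →
    (∀ m, tv.getLast? = some m → pvGetX m = X) →
    pvALoop X tv = tv.take (pvBScan tv X (tv.length - 1) + 1) := by
  induction n using Nat.strong_induction_on with
  | _ n ih =>
    intro tv X hlen hinv
    rw [pvALoop]
    by_cases hsmall : tv.length < 2
    · -- lengths 0 and 1: both sides are tv
      rw [if_pos hsmall]
      have : pvBScan tv X (tv.length - 1) = tv.length - 1 := by
        rw [pvBScan]
        have : ¬ (0 < tv.length - 1 ∧ (tv[tv.length - 1 - 1]?.bind pvGetX) = X) := by
          rintro ⟨h0, -⟩; omega
        rw [if_neg this]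
      rw [this]
      exact (List.take_of_length_le (by omega)).symm
    · rw [if_neg hsmall]
      have h2 : 2 ≤ tv.length := by omega
      -- x1 = X from the invariant
      have hx1get : PySem.List.pyGet? tv (-1) = tv[tv.length - 1]? := by
        rw [PySem.List.pyGet?_neg_ofNat tv 1 (by omega) (by omega)]
      have hlastidx : tv.getLast? = tv[tv.length - 1]? := by
        rw [List.getLast?_eq_getElem?]
      have hsome : ∃ m, tv[tv.length - 1]? = some m :=
        ⟨_, List.getElem?_eq_getElem (by omega)⟩
      obtain ⟨m, hm⟩ := hsome
      have hx1 : (PySem.List.pyGet? tv (-1)).bind pvGetX = X := by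
        rw [hx1get, hm]
        exact hinv m (by rw [hlastidx, hm])
      have hx2get : PySem.List.pyGet? tv (-2) = tv[tv.length - 2]? := by
        rw [PySem.List.pyGet?_neg_ofNat tv 2 (by omega) (by omega)]
      -- one step of B's scan
      have hscan : pvBScan tv X (tv.length - 1) =
          if (tv[tv.length - 2]?.bind pvGetX) = X then pvBScan tv X (tv.length - 2) else tv.length - 1 := by
        rw [pvBScan]
        by_cases hc : (tv[tv.length - 1 - 1]?.bind pvGetX) = X
        · rw [if_pos ⟨by omega, hc⟩]
          have e : tv.length - 1 - 1 = tv.length - 2 := by omega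
          rw [e] at hc ⊢
          rw [if_pos hc]
        · have e : tv.length - 1 - 1 = tv.length - 2 := by omega
          rw [e] at hc
          rw [if_neg (by rw [e]; tauto), if_neg hc]
      by_cases hcond : (tv[tv.length - 2]?.bind pvGetX) = X
      · -- pop / decrement branch
        have : ¬¬(X = (PySem.List.pyGet? tv (-1)).bind pvGetX ∧
            (PySem.List.pyGet? tv (-1)).bind pvGetX = (PySem.List.pyGet? tv (-2)).bind pvGetX) := by
          push Not
          exact ⟨hx1.symm, by rw [hx1, hx2get, hcond]⟩
        rw [if_neg this]
        have hlen' : tv.dropLast.length = tv.length - 1 := by simp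
        have hidx' : ∀ k, k < tv.length - 1 → tv.dropLast[k]? = tv[k]? := by
          intro k hk
          rw [List.getElem?_dropLast]
          simp [hk]
        have hinv' : ∀ m', tv.dropLast.getLast? = some m' → pvGetX m' = X := by
          intro m' hm'
          rw [List.getLast?_eq_getElem?, hlen'] at hm'
          have e : tv.length - 1 - 1 = tv.length - 2 := by omega
          rw [e, hidx' (tv.length - 2) (by omega)] at hm'
          rw [hm'] at hcond
          simpa using hcond
        have := ih (tv.length - 1) (by omega) tv.dropLast X (by omega) hinv'
        rw [this, hscan, if_pos hcond, hlen']
        have hsc : pvBScan tv.dropLast X (tv.length - 1 - 1) = pvBScan tv X (tv.length - 2) := by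
          have e : tv.length - 1 - 1 = tv.length - 2 := by omega
          rw [e]
          exact pvBScan_congr _ _ X _ (fun k hk => hidx' k (by omega))
        rw [hsc]
        have hle : pvBScan tv X (tv.length - 2) + 1 ≤ tv.length - 1 :=
          Nat.succ_le_of_lt (Nat.lt_of_le_of_lt (pvBScan_le tv X _) (by omega))
        rw [List.dropLast_eq_take, List.take_take]
        congr 1
        omega
      · -- stop branch: A returns tv, B's scan stops at length-1
        have : ¬(X = (PySem.List.pyGet? tv (-1)).bind pvGetX ∧
            (PySem.List.pyGet? tv (-1)).bind pvGetX = (PySem.List.pyGet? tv (-2)).bind pvGetX) := by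
          rintro ⟨-, h⟩
          rw [hx1, hx2get] at h
          exact hcond h.symm
        rw [if_pos this, hscan, if_neg hcond]
        rw [List.take_of_length_le (by omega)]

theorem pv_total_eq (tv : List (List (String × Int))) :
    process_raw_trend_values tv = process_raw_trend_values_alt tv := by
  unfold process_raw_trend_values process_raw_trend_values_alt
  by_cases hsmall : tv.length < 2
  · rw [pvALoop, if_pos hsmall, if_pos hsmall]
  · rw [if_neg hsmall]
    have hget : PySem.List.pyGet? tv (-1) = tv.getLast? := by
      rw [PySem.List.pyGet?_neg_ofNat tv 1 (by omega) (by omega), List.getLast?_eq_getElem?]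
    rw [hget]
    exact pvALoop_eq_take tv.length tv (tv.getLast?.bind pvGetX) rfl
      (fun m hm => by rw [hm]; rfl)

-- ===== VERDICT (by name: the statement is the Claim_ definition above) =====
theorem process_raw_trend_values_spec : Claim_equal_process_raw_trend_values := by
  intro tv _ _
  exact pv_total_eq tv
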